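-- pv_equiv track=rewrite | github.com/smartscenes/libsg | libsg/evaluation/metrics/scene_graph.py | _are_synonyms
-- ===== SOURCE A (Python) =====
-- def _are_synonyms(word1: str, word2: str) -> bool:
--     """
--     Checks if two words are synonyms.
--
--     Args:
--         word1 (str): The first word.
--         word2 (str): The second word.
--
--     Returns:
--         bool: True if the words are synonyms, False otherwise.
--     """
--     synonyms = {
--         "bed": ["single bed", "twin-sized bed", "queen-size bed", "king-size bed"],
--         "tv": ["television", "TV"],
--         "wardrobe": ["closet", "cabinet"],
--         "nightstand": ["bedside table", "side table"]
--     }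
--     return any(word1 in syns and word2 in syns for syns in synonyms.values())
-- ===== SOURCE B (Python) =====
-- _INDEX = {}
-- for _i, _syns in enumerate([
--     ["single bed", "twin-sized bed", "queen-size bed", "king-size bed"],
--     ["television", "TV"],
--     ["closet", "cabinet"],
--     ["bedside table", "side table"],
-- ]):
--     for _w in _syns:
--         _INDEX[_w] = _i
--
--
-- def _are_synonyms(word1: str, word2: str) -> bool:
--     g = _INDEX.get(word1)
--     return g is not None and g == _INDEX.get(word2)
-- ===== Notes on version B (the rewrite author's own statement) =====
-- stated objective: idiomatic
-- what changed: B precomputes once an inverted index mapping each synonym word to its group id and answers each call with two dictionary lookups instead of scanning every group for both words.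
import Mathlib
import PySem

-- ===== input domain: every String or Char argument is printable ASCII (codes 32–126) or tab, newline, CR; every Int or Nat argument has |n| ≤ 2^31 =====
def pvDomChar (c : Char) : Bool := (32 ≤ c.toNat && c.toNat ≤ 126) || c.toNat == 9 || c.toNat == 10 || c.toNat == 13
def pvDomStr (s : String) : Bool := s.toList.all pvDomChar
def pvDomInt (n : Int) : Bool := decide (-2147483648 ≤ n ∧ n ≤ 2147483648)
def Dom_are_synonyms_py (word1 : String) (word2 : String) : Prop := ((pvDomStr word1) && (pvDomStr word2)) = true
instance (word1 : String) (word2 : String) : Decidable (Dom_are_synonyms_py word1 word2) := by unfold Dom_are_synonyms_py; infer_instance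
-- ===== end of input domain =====

-- B precomputes an inverted word→group-id index once and answers with two lookups instead of scanning every group for both words (idiomatic/alternative; not timed faster).

-- ===== PORT A =====
def are_synonyms_py (word1 : String) (word2 : String) : Bool :=
  let synonyms : PySem.Dict String (List String) := PySem.Dict.ofList
    [("bed", ["single bed", "twin-sized bed", "queen-size bed", "king-size bed"]),
     ("tv", ["television", "TV"]),
     ("wardrobe", ["closet", "cabinet"]),
     ("nightstand", ["bedside table", "side table"])]
  synonyms.values.any (fun syns => syns.contains word1 && syns.contains word2)

-- ===== PORT B =====
-- the module-level index: for i, syns in enumerate(groups): for w in syns: _INDEX[w] = i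
def pvIndex_are_synonyms : PySem.Dict String Int :=
  (PySem.List.enumerate
    [["single bed", "twin-sized bed", "queen-size bed", "king-size bed"],
     ["television", "TV"],
     ["closet", "cabinet"],
     ["bedside table", "side table"]]).foldl
    (fun d p => p.2.foldl (fun d w => d.insert w p.1) d) PySem.Dict.empty

def are_synonyms_py_alt (word1 : String) (word2 : String) : Bool :=
  match pvIndex_are_synonyms.get? word1 with
  | none => false
  | some g => pvIndex_are_synonyms.get? word2 == some g

-- ===== PRECONDITION & SPEC =====
def Spec_are_synonyms_py (word1 : String) (word2 : String) (out : Bool) : Prop := out = are_synonyms_py_alt word1 word2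
instance (word1 : String) (word2 : String) (out : Bool) : Decidable (Spec_are_synonyms_py word1 word2 out) := by unfold Spec_are_synonyms_py; infer_instance

-- ===== CLAIM (what is proved, stated in full; the proofs are below) =====
def Claim_equal_are_synonyms_py : Prop := ∀ (word1 : String) (word2 : String), Dom_are_synonyms_py word1 word2 → Spec_are_synonyms_py word1 word2 (are_synonyms_py word1 word2)

-- ===== LEMMAS AND PROOFS =====

-- every string is one of the 12 indexed synonym words or none of them
theorem pv_split12 (w : String) :
    w = "single bed" ∨ w = "twin-sized bed" ∨ w = "queen-size bed" ∨ w = "king-size bed" ∨ w = "television" ∨ w = "TV" ∨ w = "closet" ∨ w = "cabinet" ∨ w = "bedside table" ∨ w = "side table" ∨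
    (w ≠ "single bed" ∧ w ≠ "twin-sized bed" ∧ w ≠ "queen-size bed" ∧ w ≠ "king-size bed" ∧ w ≠ "television" ∧ w ≠ "TV" ∧ w ≠ "closet" ∧ w ≠ "cabinet" ∧ w ≠ "bedside table" ∧ w ≠ "side table") := by
  by_cases h0 : w = "single bed"; · tauto
  by_cases h1 : w = "twin-sized bed"; · tauto
  by_cases h2 : w = "queen-size bed"; · tauto
  by_cases h3 : w = "king-size bed"; · tauto
  by_cases h4 : w = "television"; · tauto
  by_cases h5 : w = "TV"; · tauto
  by_cases h6 : w = "closet"; · tauto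
  by_cases h7 : w = "cabinet"; · tauto
  by_cases h8 : w = "bedside table"; · tauto
  by_cases h9 : w = "side table"; · tauto
  tauto

-- the inverted index on each indexed word (closed computations)
theorem pv_idx_0 : pvIndex_are_synonyms.get? "single bed" = some 0 := by decide
theorem pv_idx_1 : pvIndex_are_synonyms.get? "twin-sized bed" = some 0 := by decide
theorem pv_idx_2 : pvIndex_are_synonyms.get? "queen-size bed" = some 0 := by decide
theorem pv_idx_3 : pvIndex_are_synonyms.get? "king-size bed" = some 0 := by decide
theorem pv_idx_4 : pvIndex_are_synonyms.get? "television" = some 1 := by decide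
theorem pv_idx_5 : pvIndex_are_synonyms.get? "TV" = some 1 := by decide
theorem pv_idx_6 : pvIndex_are_synonyms.get? "closet" = some 2 := by decide
theorem pv_idx_7 : pvIndex_are_synonyms.get? "cabinet" = some 2 := by decide
theorem pv_idx_8 : pvIndex_are_synonyms.get? "bedside table" = some 3 := by decide
theorem pv_idx_9 : pvIndex_are_synonyms.get? "side table" = some 3 := by decide

-- a word outside the table is absent from the inverted index
theorem pv_idx_none (w : String) (h0 : w ≠ "single bed") (h1 : w ≠ "twin-sized bed") (h2 : w ≠ "queen-size bed") (h3 : w ≠ "king-size bed") (h4 : w ≠ "television") (h5 : w ≠ "TV") (h6 : w ≠ "closet") (h7 : w ≠ "cabinet") (h8 : w ≠ "bedside table") (h9 : w ≠ "side table") :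
    pvIndex_are_synonyms.get? w = none := by
  simp [pvIndex_are_synonyms, PySem.List.enumerate, PySem.Dict.insert, PySem.Dict.get?,
        PySem.Dict.empty, List.find?, show ("single bed" == w) = false from by simp [Ne.symm h0], show ("twin-sized bed" == w) = false from by simp [Ne.symm h1], show ("queen-size bed" == w) = false from by simp [Ne.symm h2], show ("king-size bed" == w) = false from by simp [Ne.symm h3], show ("television" == w) = false from by simp [Ne.symm h4], show ("TV" == w) = false from by simp [Ne.symm h5], show ("closet" == w) = false from by simp [Ne.symm h6], show ("cabinet" == w) = false from by simp [Ne.symm h7], show ("bedside table" == w) = false from by simp [Ne.symm h8], show ("side table" == w) = false from by simp [Ne.symm h9]]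

-- ===== VERDICT (by name: the statement is the Claim_ definition above) =====
set_option maxHeartbeats 2000000 in
theorem are_synonyms_py_spec : Claim_equal_are_synonyms_py := by
  intro w1 w2 _
  unfold Spec_are_synonyms_py
  rcases pv_split12 w1 with h|h|h|h|h|h|h|h|h|h|hh <;>
    rcases pv_split12 w2 with g|g|g|g|g|g|g|g|g|g|gg <;>
    simp_all [are_synonyms_py, are_synonyms_py_alt, PySem.Dict.ofList, PySem.Dict.update, PySem.Dict.empty, PySem.Dict.insert, PySem.Dict.values, pv_idx_0, pv_idx_1, pv_idx_2, pv_idx_3, pv_idx_4, pv_idx_5, pv_idx_6, pv_idx_7, pv_idx_8, pv_idx_9, pv_idx_none]
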